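-- pv_equiv track=rewrite | github.com/2024-pass-backend/algorithm | Week2/공통/문자열나누기/suhyun1.py | solution
-- ===== SOURCE A (Python) =====
-- def solution(s):
--     answer = 0
--     cnt1, cnt2 = 0, 0
--
--     for i in s:
--         if cnt1 == cnt2:
--             k = i
--             answer += 1
--
--         if k == i:
--             cnt1 += 1
--         else:
--             cnt2 += 1
--     return answer
-- ===== SOURCE B (Python) =====
-- def solution(s):
--     # segment-stripping decomposition: an outer loop per segment; an inner scan
--     # finds where the segment closes (diff back to 0), then restart after it
--     cnt = 0
--     i = 0
--     n = len(s)
--     while i < n: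
--         diff = 1  # s[i] matches itself
--         j = i + 1
--         while j < n and diff != 0:
--             diff += 1 if s[j] == s[i] else -1
--             j += 1
--         cnt += 1
--         i = j
--     return cnt
-- ===== Notes on version B (the rewrite author's own statement) =====
-- stated objective: alternative
-- what changed: B decomposes the string into segments explicitly: an outer loop strips one segment per iteration, with an inner scan locating the segment's closing position, instead of A's single flat pass maintaining two running counters and counting segment starts.
import Mathlib
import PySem

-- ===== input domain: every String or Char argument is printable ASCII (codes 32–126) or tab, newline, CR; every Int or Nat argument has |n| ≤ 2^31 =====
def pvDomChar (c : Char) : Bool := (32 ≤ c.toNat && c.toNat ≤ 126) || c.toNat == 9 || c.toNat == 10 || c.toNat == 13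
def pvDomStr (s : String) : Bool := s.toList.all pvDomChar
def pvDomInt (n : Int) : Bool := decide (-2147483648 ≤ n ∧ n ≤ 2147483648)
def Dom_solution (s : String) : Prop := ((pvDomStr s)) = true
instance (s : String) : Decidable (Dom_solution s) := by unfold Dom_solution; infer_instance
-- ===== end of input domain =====

-- B recursively strips the leading segment (found by an inner scan) and recurses on the remainder, instead of A's single iterative pass; same return values.


-- ===== PORT A =====
-- step of A's loop over the characters: state (answer, cnt1, cnt2, k); k starts unset (none)
def stepA (st : Int × Int × Int × Option Char) (i : Char) : Int × Int × Int × Option Char :=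
  let (answer, cnt1, cnt2, k) := st
  let (k, answer) := if cnt1 == cnt2 then (some i, answer + 1) else (k, answer)
  if k == some i then (answer, cnt1 + 1, cnt2, k) else (answer, cnt1, cnt2 + 1, k)

def solution (s : String) : Int :=
  (s.toList.foldl stepA (0, 0, 0, none)).1

-- ===== PORT B =====
-- B's inner scan: walk the tail with the running diff; when diff hits 0 return the
-- remainder (the slice s[idx+1:]); none = the loop ran off the end (trailing segment).
def segB (first : Char) (diff : Int) : List Char → Option (List Char)
  | [] => none
  | ch :: t =>
    let d := diff + (if ch == first then 1 else -1)
    if d = 0 then some t else segB first d t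

theorem segB_some_length {f : Char} {d : Int} : ∀ {l r : List Char},
    segB f d l = some r → r.length < l.length := by
  intro l
  induction l generalizing d with
  | nil => intro r h; simp [segB] at h
  | cons ch t ih =>
    intro r h
    simp only [segB] at h
    by_cases hz : d + (if ch == f then 1 else -1) = 0
    · rw [if_pos hz] at h
      cases h; simp
    · rw [if_neg hz] at h
      exact Nat.lt_succ_of_lt (ih h)

-- B on the character list: peel the leading segment, recurse on the remainder
def solB (l : List Char) : Int :=
  match l with
  | [] => 0
  | ch :: t =>
    match hs : segB ch 1 t with
    | some r => 1 + solB r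
    | none => 1
termination_by l.length
decreasing_by exact Nat.lt_succ_of_lt (segB_some_length hs)

def solution_alt (s : String) : Int := solB s.toList

-- ===== PRECONDITION & SPEC =====
def Spec_solution (s : String) (out : Int) : Prop := out = solution_alt s
instance (s : String) (out : Int) : Decidable (Spec_solution s out) := by unfold Spec_solution; infer_instance

-- ===== CLAIM (what is proved, stated in full; the proofs are below) =====
def Claim_equal_solution : Prop := ∀ (s : String), Dom_solution s → Spec_solution s (solution s)

-- ===== LEMMAS AND PROOFS =====

theorem segB_cons (f ch : Char) (d : Int) (t : List Char) :
    segB f d (ch :: t) =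
      if d + (if ch == f then 1 else -1) = 0 then some t
      else segB f (d + (if ch == f then 1 else -1)) t := rfl

theorem solB_cons (ch : Char) (t : List Char) :
    solB (ch :: t) = match segB ch 1 t with
      | some r => 1 + solB r
      | none => 1 := by
  rw [solB]
  cases hseg : segB ch 1 t <;> simp

-- Mid-segment lemma: from an A-state with cnt1 ≠ cnt2 and segment-first f, the fold's
-- answer is `a` if the segment never closes, and continues freshly on the remainder r
-- otherwise (the fresh behaviour on r is supplied as hypothesis H, fed later by strong
-- induction on the length).
theorem midA : ∀ (t : List Char) (a c1 c2 : Int) (f : Char), c1 ≠ c2 →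
    (∀ r, segB f (c1 - c2) t = some r →
      ∀ (a' c' : Int) (k' : Option Char), (List.foldl stepA (a', c', c', k') r).1 = a' + solB r) →
    (List.foldl stepA (a, c1, c2, some f) t).1 =
      match segB f (c1 - c2) t with
      | none => a
      | some r => a + solB r := by
  intro t
  induction t with
  | nil => intro a c1 c2 f _ _; simp [segB]
  | cons ch t ih =>
    intro a c1 c2 f hne H
    have hb : (c1 == c2) = false := by simp [hne]
    simp only [List.foldl, stepA, hb, Bool.false_eq_true, if_false]
    rw [segB_cons] at H ⊢
    by_cases hf : f = ch
    · -- matching char: cnt1 += 1, diff goes up by 1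
      subst hf
      have hcf : (f == f) = true := by simp
      simp only [beq_iff_eq, hcf, if_true] at H ⊢
      have e : c1 - c2 + 1 = c1 + 1 - c2 := by ring
      rw [e] at H ⊢
      by_cases hz : c1 + 1 - c2 = 0
      · rw [if_pos hz] at H ⊢
        have hc : c1 + 1 = c2 := by omega
        rw [hc]
        exact H t rfl a c2 (some f)
      · rw [if_neg hz] at H ⊢
        exact ih a (c1 + 1) c2 f (by omega) H
    · -- non-matching char: cnt2 += 1, diff goes down by 1
      have hcf : (ch == f) = false := by simp [Ne.symm hf]
      have hcf2 : (some f == some ch) = false := by simp [hf]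
      simp only [hcf2, Bool.false_eq_true, if_false, hcf] at H ⊢
      have e : c1 - c2 + -1 = c1 - (c2 + 1) := by ring
      rw [e] at H ⊢
      by_cases hz : c1 - (c2 + 1) = 0
      · rw [if_pos hz] at H ⊢
        have hc : c1 = c2 + 1 := by omega
        rw [hc]
        exact H t rfl a (c2 + 1) (some f)
      · rw [if_neg hz] at H ⊢
        exact ih a c1 (c2 + 1) f (by omega) H

-- Fresh-state lemma (strong induction on the length bound n): from any A-state with
-- cnt1 = cnt2 the rest of the fold adds exactly solB l to the answer.
theorem freshA : ∀ (n : Nat) (l : List Char), l.length ≤ n →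
    ∀ (a c : Int) (k : Option Char), (List.foldl stepA (a, c, c, k) l).1 = a + solB l := by
  intro n
  induction n with
  | zero =>
    intro l hl a c k
    have : l = [] := List.length_eq_zero_iff.mp (Nat.le_zero.mp hl)
    subst this; simp [solB]
  | succ n ih =>
    intro l hl a c k
    cases l with
    | nil => simp [solB]
    | cons ch t =>
      -- first iteration: cnt1 == cnt2, so k := ch, answer += 1, then cnt1 += 1
      simp only [List.foldl, stepA, beq_self_eq_true, if_true]
      have e1 : c + 1 - c = 1 := by ring
      have hmid := midA t (a + 1) (c + 1) c ch (by omega)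
        (fun r hr a' c' k' => ih r (by
            have := segB_some_length (by rw [e1] at hr; exact hr)
            have ht : t.length ≤ n := by simpa using hl
            omega) a' c' k')
      rw [e1] at hmid
      rw [hmid, solB_cons]
      cases hseg : segB ch 1 t with
      | none => simp
      | some r => simp; ring

-- ===== VERDICT (by name: the statement is the Claim_ definition above) =====
theorem solution_spec : Claim_equal_solution := by
  intro s _
  unfold Spec_solution solution solution_alt
  have := freshA s.toList.length s.toList (le_refl _) 0 0 none
  simpa using this
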